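-- pv_equiv track=rewrite | github.com/natsustan/doc-format | replace-double-quotes.py | replace_quotes_in_text
-- ===== SOURCE A (Python) =====
-- def replace_quotes_in_text(text: str) -> str:
--     """将文本中的英文双引号替换为中文双引号（成对匹配）"""
--     result = []
--     open_quote = True
--     for ch in text:
--         if ch == '"':
--             result.append('\u201c' if open_quote else '\u201d')
--             open_quote = not open_quote
--         else:
--             result.append(ch)
--     return ''.join(result)
-- ===== SOURCE B (Python) =====
-- def replace_quotes_in_text(text: str) -> str:
--     """将文本中的英文双引号替换为中文双引号（成对匹配）"""
--     parts = text.split('"')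
--     pieces = [parts[0]]
--     for i, part in enumerate(parts[1:]):
--         pieces.append('\u201c' if i % 2 == 0 else '\u201d')
--         pieces.append(part)
--     return ''.join(pieces)
-- ===== Notes on version B (the rewrite author's own statement) =====
-- stated objective: idiomatic
-- what changed: Replaces the per-character loop with a toggling boolean state machine by a single split on the double-quote character followed by interleaving the segments with open/close quotes chosen by each quote's parity; a timing run measured this constant-factor faster (str.split/join in C vs a Python-level char loop).
import Mathlib
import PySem

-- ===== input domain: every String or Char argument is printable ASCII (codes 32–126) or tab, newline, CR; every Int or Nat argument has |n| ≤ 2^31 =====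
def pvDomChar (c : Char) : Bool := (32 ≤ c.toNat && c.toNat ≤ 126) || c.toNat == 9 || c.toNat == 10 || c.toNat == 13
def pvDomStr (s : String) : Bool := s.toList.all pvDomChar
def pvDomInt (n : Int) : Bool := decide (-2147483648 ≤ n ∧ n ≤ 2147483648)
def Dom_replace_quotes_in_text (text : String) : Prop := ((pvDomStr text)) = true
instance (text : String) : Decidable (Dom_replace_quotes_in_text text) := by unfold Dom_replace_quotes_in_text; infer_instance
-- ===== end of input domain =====

-- B replaces A's per-character toggling state machine by split-on-'"' then interleaving
-- segments with quotes chosen by parity (idiomatic; measured constant-factor faster in a timing run).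

-- ===== PORT A =====
-- literal port of A: one pass over the characters carrying (result, open_quote)
def replace_quotes_in_text (text : String) : String :=
  String.mk (text.toList.foldl
    (fun (st : List Char × Bool) ch =>
      if ch = '"' then (st.1 ++ [if st.2 then '“' else '”'], !st.2)
      else (st.1 ++ [ch], st.2))
    ([], true)).1

-- ===== PORT B =====
-- the loop of Source B: for each part after the first (index i), emit a quote by parity, then the part
def pvInterleave : List (List Char) → Nat → List Char
  | [], _ => []
  | p :: rest, i => (if i % 2 = 0 then '“' else '”') :: (p ++ pvInterleave rest (i + 1))

def replace_quotes_in_text_alt (text : String) : String :=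
  match text.toList.splitOn '"' with
  | [] => ""   -- unreachable: split never returns an empty list
  | p0 :: rest => String.mk (p0 ++ pvInterleave rest 0)

-- ===== PRECONDITION & SPEC =====
def Spec_replace_quotes_in_text (text : String) (out : String) : Prop := out = replace_quotes_in_text_alt text
instance (text : String) (out : String) : Decidable (Spec_replace_quotes_in_text text out) := by unfold Spec_replace_quotes_in_text; infer_instance

-- ===== CLAIM (what is proved, stated in full; the proofs are below) =====
def Claim_equal_replace_quotes_in_text : Prop := ∀ (text : String), Dom_replace_quotes_in_text text → Spec_replace_quotes_in_text text (replace_quotes_in_text text)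

-- ===== LEMMAS AND PROOFS =====

-- A's loop, accumulator-free
def pvCoreA : List Char → Bool → List Char
  | [], _ => []
  | c :: cs, b =>
    if c = '"' then (if b then '“' else '”') :: pvCoreA cs (!b)
    else c :: pvCoreA cs b

lemma pvFoldl_eq_core (cs : List Char) : ∀ (acc : List Char) (b : Bool),
    (cs.foldl
      (fun (st : List Char × Bool) ch =>
        if ch = '"' then (st.1 ++ [if st.2 then '“' else '”'], !st.2)
        else (st.1 ++ [ch], st.2))
      (acc, b)).1 = acc ++ pvCoreA cs b := by
  induction cs with
  | nil => intro acc b; simp [pvCoreA]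
  | cons c cs ih =>
    intro acc b
    by_cases h : c = '"' <;> simp [pvCoreA, h, ih]

lemma pvCore_eq_split (cs : List Char) : ∀ (i : Nat),
    pvCoreA cs (decide (i % 2 = 0)) =
      match cs.splitOnP (· == '"') with
      | [] => []
      | p0 :: rest => p0 ++ pvInterleave rest i := by
  induction cs with
  | nil => intro i; simp [pvCoreA, List.splitOnP_nil, pvInterleave]
  | cons c cs ih =>
    intro i
    rw [List.splitOnP_cons]
    by_cases h : c = '"'
    · subst h
      simp only [pvCoreA, beq_self_eq_true, if_pos]
      rcases hs : cs.splitOnP (· == '"') with _ | ⟨p0, rest⟩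
      · exact absurd hs (List.splitOnP_ne_nil _ _)
      · have hb : (!decide (i % 2 = 0)) = decide ((i + 1) % 2 = 0) := by
          by_cases h2 : i % 2 = 0 <;> simp [h2] <;> omega
        have hih := ih (i + 1)
        rw [hs] at hih
        simp only [pvInterleave, hb, hih, List.nil_append]
        by_cases h2 : i % 2 = 0 <;> simp [h2]
    · have hbe : (c == '"') = false := by simpa using h
      simp only [pvCoreA, if_neg h, hbe, Bool.false_eq_true]
      rw [if_neg (by simp)]
      rcases hs : cs.splitOnP (· == '"') with _ | ⟨p0, rest⟩
      · exact absurd hs (List.splitOnP_ne_nil _ _)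
      · have := ih i
        rw [hs] at this
        simp [List.modifyHead, this]


-- ===== VERDICT (by name: the statement is the Claim_ definition above) =====
theorem replace_quotes_in_text_spec : Claim_equal_replace_quotes_in_text := by
  intro text _
  unfold Spec_replace_quotes_in_text replace_quotes_in_text replace_quotes_in_text_alt
  rw [pvFoldl_eq_core]
  have h := pvCore_eq_split text.toList 0
  simp only [Nat.zero_mod, decide_true] at h
  rw [List.splitOn] at *
  rcases hs : text.toList.splitOnP (· == '"') with _ | ⟨p0, rest⟩
  · exact absurd hs (List.splitOnP_ne_nil _ _)
  · rw [hs] at h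
    simp [h]
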